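-- pv_equiv track=rewrite | github.com/Jerrling02/ASFL | draw_result.py | get_color_list
-- ===== SOURCE A (Python) =====
-- def get_color_list(length):
--     color_list = [
--         '#19CAAD',
--         '#8CC7B5',
--         '#A0EEE1',
--         '#BEE7E9',
--         '#BEEDC7',
--         '#D6D5B7',
--         '#D1BA74',
--         '#E6CEAC',
--         '#ECAD9E',
--         '#F4606C'
--     ]
--     start = 0
--     ret_color_list = []
--     for i in range(length):
--         ret_color_list.append(color_list[start])
--         start += 3
--         start %= len(color_list)
--     return ret_color_list
-- ===== SOURCE B (Python) =====
-- def get_color_list(length):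
--     color_list = [
--         '#19CAAD',
--         '#8CC7B5',
--         '#A0EEE1',
--         '#BEE7E9',
--         '#BEEDC7',
--         '#D6D5B7',
--         '#D1BA74',
--         '#E6CEAC',
--         '#ECAD9E',
--         '#F4606C'
--     ]
--     # period-10 unit: the palette reordered by step 3 mod 10, obtained by a
--     # stride-3 slice over the palette tripled (no indexing, no modular arithmetic)
--     unit = (color_list * 3)[::3]
--     reps = (length + 9) // 10
--     return (unit * reps)[:length]
-- ===== Notes on version B (the rewrite author's own statement) =====
-- stated objective: alternative
-- what changed: B builds the period-10 unit by a stride-3 slice over the tripled palette and then repeats and truncates that unit, replacing A's loop with its running modular index accumulator and per-element appends by slicing and list repetition.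
import Mathlib
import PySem

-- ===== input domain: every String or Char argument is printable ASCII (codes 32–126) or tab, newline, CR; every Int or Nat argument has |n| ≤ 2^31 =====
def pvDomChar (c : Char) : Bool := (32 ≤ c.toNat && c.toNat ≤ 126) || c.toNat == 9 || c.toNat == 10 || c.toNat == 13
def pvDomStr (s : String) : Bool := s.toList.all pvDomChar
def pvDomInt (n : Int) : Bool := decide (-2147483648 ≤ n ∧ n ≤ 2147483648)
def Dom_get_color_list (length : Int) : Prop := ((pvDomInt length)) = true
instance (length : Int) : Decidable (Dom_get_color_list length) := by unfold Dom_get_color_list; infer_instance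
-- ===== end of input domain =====

-- B builds the period-10 unit by a stride-3 slice over the tripled palette and repeats/truncates it,
-- instead of A's loop with a running modular index accumulator; objective: alternative decomposition.

-- ===== PORT A =====
def get_color_list (length : Int) : List String :=
  let color_list : List String :=
    ["#19CAAD", "#8CC7B5", "#A0EEE1", "#BEE7E9", "#BEEDC7",
     "#D6D5B7", "#D1BA74", "#E6CEAC", "#ECAD9E", "#F4606C"]
  let st := (PySem.List.pyRange 0 length 1).foldl
    (fun (st : Int × List String) _i =>
      (PySem.Int.mod (st.1 + 3) (PySem.List.len color_list),
       st.2 ++ [PySem.List.pyGetD color_list st.1 ""]))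
    (0, ([] : List String))
  st.2

-- ===== PORT B =====
def get_color_list_alt (length : Int) : List String :=
  let color_list : List String :=
    ["#19CAAD", "#8CC7B5", "#A0EEE1", "#BEE7E9", "#BEEDC7",
     "#D6D5B7", "#D1BA74", "#E6CEAC", "#ECAD9E", "#F4606C"]
  let tripled := PySem.List.pyRepeat color_list 3
  -- (color_list * 3)[::3]; the step 3 is nonzero, so slice? is always `some` here
  let unit := (PySem.List.slice? tripled none none 3).getD []
  let reps := PySem.Int.floordiv (length + 9) 10
  PySem.List.slice (PySem.List.pyRepeat unit reps) none (some length)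

-- ===== PRECONDITION & SPEC =====
def Spec_get_color_list (length : Int) (out : List String) : Prop := out = get_color_list_alt length
instance (length : Int) (out : List String) : Decidable (Spec_get_color_list length out) := by unfold Spec_get_color_list; infer_instance

-- ===== CLAIM (what is proved, stated in full; the proofs are below) =====
def Claim_equal_get_color_list : Prop := ∀ (length : Int), Dom_get_color_list length → Spec_get_color_list length (get_color_list length)

-- ===== LEMMAS AND PROOFS =====

/-- The palette, as used by both ports. -/
def pvC : List String :=
  ["#19CAAD", "#8CC7B5", "#A0EEE1", "#BEE7E9", "#BEEDC7",
   "#D6D5B7", "#D1BA74", "#E6CEAC", "#ECAD9E", "#F4606C"]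

/-- The colour A emits on iteration `k`. -/
def pvG (k : Nat) : String := pvC.getD ((3 * k) % 10) ""

/-- Characterisation of A's loop: fold of the step over any index list. -/
lemma pvA_fold (l : List Int) (s : Nat) (hs : s < 10) (acc : List String) :
    (l.foldl
      (fun (st : Int × List String) _i =>
        (PySem.Int.mod (st.1 + 3) (PySem.List.len pvC),
         st.2 ++ [PySem.List.pyGetD pvC st.1 ""]))
      ((s : Int), acc)).2
    = acc ++ (List.range l.length).map (fun k => pvC.getD ((s + 3 * k) % 10) "") := by
  induction l generalizing s acc with
  | nil => simp
  | cons x xs ih =>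
    have hstep : PySem.Int.mod ((s : Int) + 3) (PySem.List.len pvC) = ((((s + 3) % 10 : Nat)) : Int) := by
      have : ((s : Int) + 3) = ((s + 3 : Nat) : Int) := by push_cast; ring
      rw [this, show PySem.List.len pvC = (10 : Int) from by simp [PySem.List.len_eq, pvC]]
      exact_mod_cast PySem.Int.mod_natCast (s + 3) 10
    have hget : PySem.List.pyGetD pvC ((s : Int)) "" = pvC.getD s "" := by
      simp
    simp only [List.foldl_cons, hstep, hget]
    rw [ih ((s + 3) % 10) (Nat.mod_lt _ (by omega)) (acc ++ [pvC.getD s ""])]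
    have hmap : List.map (fun k => pvC.getD (((s + 3) % 10 + 3 * k) % 10) "") (List.range xs.length)
        = List.map ((fun k => pvC.getD ((s + 3 * k) % 10) "") ∘ Nat.succ) (List.range xs.length) := by
      apply List.map_congr_left
      intro a _
      simp only [Function.comp_apply, Nat.succ_eq_add_one]
      have he : ((s + 3) % 10 + 3 * a) % 10 = (s + 3 * (a + 1)) % 10 := by omega
      rw [he]
    rw [List.length_cons, List.range_succ_eq_map, List.map_cons, List.map_map, ← hmap]
    simp [Nat.mod_eq_of_lt hs]

/-- The repeated list, indexed cyclically. -/
lemma pvRepeat_eq {α : Type} (u : List α) (d : α) (hu : u.length = 10) (m : Nat) :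
    PySem.List.pyRepeat u (m : Int)
      = (List.range (10 * m)).map (fun k => u.getD (k % 10) d) := by
  induction m with
  | zero => simp [PySem.List.pyRepeat]
  | succ m ih =>
    have h1 : PySem.List.pyRepeat u ((m + 1 : Nat) : Int) = u ++ PySem.List.pyRepeat u (m : Int) := by
      simp [PySem.List.pyRepeat, List.replicate_succ]
    rw [h1, ih]
    have h2 : 10 * (m + 1) = 10 + 10 * m := by omega
    rw [h2, List.range_add, List.map_append, List.map_map]
    congr 1
    · apply List.ext_getElem
      · simp [hu]
      · intro i h₁ h₂
        have hi : i < 10 := hu ▸ h₁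
        simp only [List.getElem_map, List.getElem_range]
        rw [Nat.mod_eq_of_lt hi]
        exact (List.getD_eq_getElem u d h₁).symm
    · apply List.map_congr_left
      intro a _
      have he : (10 + a) % 10 = a % 10 := by omega
      simp [he]

/-- B's unit — the stride-3 slice of the tripled palette — is the step-3 reordering of the palette. -/
lemma pvUnit_eq :
    ((PySem.List.slice? (PySem.List.pyRepeat pvC 3) none none 3).getD [])
      = (List.range 10).map pvG := by
  decide

lemma pvUnit_len : ((List.range 10).map pvG).length = 10 := by simp

/-- B's value on a nonnegative length. -/
lemma pvB_nonneg (n : Nat) :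
    get_color_list_alt (n : Int) = (List.range n).map pvG := by
  unfold get_color_list_alt
  simp only []
  rw [show (["#19CAAD", "#8CC7B5", "#A0EEE1", "#BEE7E9", "#BEEDC7",
     "#D6D5B7", "#D1BA74", "#E6CEAC", "#ECAD9E", "#F4606C"] : List String) = pvC from rfl]
  rw [pvUnit_eq]
  have hq : PySem.Int.floordiv ((n : Int) + 9) 10 = (((n + 9) / 10 : Nat) : Int) := by
    have : ((n : Int) + 9) = ((n + 9 : Nat) : Int) := by push_cast; ring
    rw [this]
    exact_mod_cast PySem.Int.floordiv_natCast (n + 9) 10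
  rw [hq, pvRepeat_eq ((List.range 10).map pvG) "" pvUnit_len ((n + 9) / 10)]
  rw [PySem.List.slice_to_natCast]
  rw [← List.map_take, List.take_range]
  have hmin : min n (10 * ((n + 9) / 10)) = n := by omega
  rw [hmin]
  apply List.map_congr_left
  intro k hk
  have hk10 : k % 10 < 10 := Nat.mod_lt _ (by omega)
  have : ((List.range 10).map pvG).getD (k % 10) "" = pvG (k % 10) := by
    rw [List.getD_eq_getElem _ _ (by simpa using hk10)]
    simp
  rw [this]
  unfold pvG
  congr 1
  omega

/-- A's value on a nonnegative length. -/
lemma pvA_nonneg (n : Nat) :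
    get_color_list (n : Int) = (List.range n).map pvG := by
  unfold get_color_list
  simp only []
  rw [show (["#19CAAD", "#8CC7B5", "#A0EEE1", "#BEE7E9", "#BEEDC7",
     "#D6D5B7", "#D1BA74", "#E6CEAC", "#ECAD9E", "#F4606C"] : List String) = pvC from rfl]
  have h := pvA_fold (PySem.List.pyRange 0 (n : Int) 1) 0 (by omega) []
  rw [Nat.cast_zero] at h
  rw [h, PySem.List.length_pyRange_one]
  simp [pvG]

theorem pv_equal (length : Int) : get_color_list length = get_color_list_alt length := by
  by_cases h : 0 ≤ length
  · obtain ⟨n, rfl⟩ : ∃ n : Nat, length = (n : Int) := ⟨length.toNat, (Int.toNat_of_nonneg h).symm⟩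
    rw [pvA_nonneg, pvB_nonneg]
  · have h : length < 0 := by omega
    have hA : get_color_list length = [] := by
      unfold get_color_list
      rw [PySem.List.pyRange_one_eq_nil (by omega)]
      rfl
    have hB : get_color_list_alt length = [] := by
      unfold get_color_list_alt
      simp [PySem.List.pyRepeat, PySem.List.slice,
        show ((length + 9) / 10).toNat = 0 from by omega, PySem.List.clampIdx]
    rw [hA, hB]

-- ===== VERDICT (by name: the statement is the Claim_ definition above) =====
theorem get_color_list_spec : Claim_equal_get_color_list := by
  intro length _
  unfold Spec_get_color_list
  exact pv_equal length
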